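-- pv_equiv track=rewrite | github.com/wguDataNinja/wgu-atlas | scripts/compare_program_courses.py | append_missing_closers
-- ===== SOURCE A (Python) =====
-- def append_missing_closers(raw: str) -> str:
--     stack: list[str] = []
--     in_string = False
--     escaped = False
--     for ch in raw:
--         if in_string:
--             if escaped:
--                 escaped = False
--                 continue
--             if ch == "\\":
--                 escaped = True
--                 continue
--             if ch == '"':
--                 in_string = False
--             continue
--         if ch == '"':
--             in_string = True
--             continue
--         if ch == "{":
--             stack.append("}")
--         elif ch == "[":
--             stack.append("]")
--         elif ch in "}]":
--             if stack and ch == stack[-1]: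
--                 stack.pop()
--     if not stack:
--         return raw
--     return raw + "".join(reversed(stack))
-- ===== SOURCE B (Python) =====
-- def append_missing_closers(raw: str) -> str:
--     # pass 1: lex, collecting structural chars that occur outside string literals
--     structs = []
--     i = 0
--     n = len(raw)
--     while i < n:
--         ch = raw[i]
--         if ch == '"':
--             i += 1
--             while i < n:
--                 if raw[i] == '\\':
--                     i += 2
--                 elif raw[i] == '"':
--                     i += 1
--                     break
--                 else:
--                     i += 1
--             continue
--         if ch in '{}[]':
--             structs.append(ch)
--         i += 1
--     # pass 2: plain stack balancer over the structural chars
--     stack = []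
--     for ch in structs:
--         if ch == '{':
--             stack.append('}')
--         elif ch == '[':
--             stack.append(']')
--         elif stack and ch == stack[-1]:
--             stack.pop()
--     if not stack:
--         return raw
--     return raw + ''.join(reversed(stack))
-- ===== Notes on version B (the rewrite author's own statement) =====
-- stated objective: alternative
-- what changed: A's single fused loop (string/escape flags and bracket stack in one pass) is split into a string-lexing pass that collects the structural chars outside string literals, followed by a plain stack balancer over that list.
import Mathlib
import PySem

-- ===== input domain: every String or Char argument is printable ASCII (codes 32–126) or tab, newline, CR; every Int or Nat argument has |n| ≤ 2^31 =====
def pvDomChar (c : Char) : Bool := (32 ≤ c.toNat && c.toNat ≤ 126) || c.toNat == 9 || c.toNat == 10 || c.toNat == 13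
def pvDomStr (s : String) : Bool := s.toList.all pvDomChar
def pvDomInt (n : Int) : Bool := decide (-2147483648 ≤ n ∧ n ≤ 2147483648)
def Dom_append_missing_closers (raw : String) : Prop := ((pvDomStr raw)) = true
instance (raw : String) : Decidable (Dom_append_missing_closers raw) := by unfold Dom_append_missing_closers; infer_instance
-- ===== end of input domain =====

-- B re-decomposes A's single fused loop into a string-lexing pass that extracts the structural
-- chars outside string literals, followed by a plain stack balancer over that list (objective: alternative).

-- ===== PORT A =====
-- Stack is held top-at-head (Python appends/pops at the end), so Python's "".join(reversed(stack))
-- is String.ofList of the list as held.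
def amcStepA (st : List Char × Bool × Bool) (ch : Char) : List Char × Bool × Bool :=
  match st with
  | (stack, in_string, escaped) =>
    if in_string then
      if escaped then (stack, in_string, false)
      else if ch = '\\' then (stack, in_string, true)
      else if ch = '"' then (stack, false, escaped)
      else (stack, in_string, escaped)
    else if ch = '"' then (stack, true, escaped)
    else if ch = '{' then ('}' :: stack, in_string, escaped)
    else if ch = '[' then (']' :: stack, in_string, escaped)
    else if ch = '}' ∨ ch = ']' then
      match stack with
      | top :: rest => if ch = top then (rest, in_string, escaped) else (stack, in_string, escaped)
      | [] => (stack, in_string, escaped)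
    else (stack, in_string, escaped)

def append_missing_closers (raw : String) : String :=
  let st := raw.toList.foldl amcStepA ([], false, false)
  if st.1 = [] then raw else raw ++ String.ofList st.1

-- ===== PORT B =====
-- pass 1: lex, collecting structural chars outside string literals
mutual
def amcLex : List Char → List Char
  | [] => []
  | c :: rest =>
    if c = '"' then amcLexStr rest
    else if c = '{' ∨ c = '}' ∨ c = '[' ∨ c = ']' then c :: amcLex rest
    else amcLex rest
  termination_by cs => cs.length
  decreasing_by all_goals simp
def amcLexStr : List Char → List Char
  | [] => []
  | c :: rest =>
    if c = '\\' then amcLexStr rest.tail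
    else if c = '"' then amcLex rest
    else amcLexStr rest
  termination_by cs => cs.length
  decreasing_by all_goals cases rest <;> simp
end

-- pass 2: stack balancer (stack held top-at-head, see the note on port A)
def amcBalance : List Char → List Char → List Char
  | [], stack => stack
  | c :: rest, stack =>
    if c = '{' then amcBalance rest ('}' :: stack)
    else if c = '[' then amcBalance rest (']' :: stack)
    else
      match stack with
      | top :: s => if c = top then amcBalance rest s else amcBalance rest stack
      | [] => amcBalance rest stack

def append_missing_closers_alt (raw : String) : String :=
  let stack := amcBalance (amcLex raw.toList) []
  if stack = [] then raw else raw ++ String.ofList stack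

-- ===== PRECONDITION & SPEC =====
def Spec_append_missing_closers (raw : String) (out : String) : Prop := out = append_missing_closers_alt raw
instance (raw : String) (out : String) : Decidable (Spec_append_missing_closers raw out) := by unfold Spec_append_missing_closers; infer_instance

-- ===== CLAIM (what is proved, stated in full; the proofs are below) =====
def Claim_equal_append_missing_closers : Prop := ∀ (raw : String), Dom_append_missing_closers raw → Spec_append_missing_closers raw (append_missing_closers raw)

-- ===== LEMMAS AND PROOFS =====
-- Main invariant, proved by strong induction on the length of the remaining input:
-- outside a string (·, false, false) A's fold computes amcBalance ∘ amcLex,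
-- inside a string (·, true, false) it computes amcBalance ∘ amcLexStr.
lemma amc_fold_eq (n : ℕ) : ∀ cs : List Char, cs.length ≤ n →
    (∀ stack, (cs.foldl amcStepA (stack, false, false)).1 = amcBalance (amcLex cs) stack) ∧
    (∀ stack, (cs.foldl amcStepA (stack, true, false)).1 = amcBalance (amcLexStr cs) stack) := by
  induction n with
  | zero =>
    intro cs h
    have : cs = [] := List.length_eq_zero_iff.mp (Nat.le_zero.mp h)
    subst this
    simp [amcLex, amcLexStr, amcBalance]
  | succ n ih =>
    intro cs h
    cases cs with
    | nil => simp [amcLex, amcLexStr, amcBalance]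
    | cons c rest =>
      have hr : rest.length ≤ n := by simpa using h
      constructor
      · intro stack
        by_cases hq : c = '"'
        · subst hq
          simp only [List.foldl, amcStepA, amcLex]
          simp [(ih rest hr).2]
        · by_cases ho : c = '{'
          · subst ho
            simp only [List.foldl, amcStepA, amcLex]
            simp [amcBalance, (ih rest hr).1]
          · by_cases hb : c = '['
            · subst hb
              simp only [List.foldl, amcStepA, amcLex]
              simp [amcBalance, (ih rest hr).1]
            · by_cases hc : c = '}' ∨ c = ']'
              · have hlex : amcLex (c :: rest) = c :: amcLex rest := by
                  rw [amcLex]; rcases hc with hc | hc <;> simp [hc]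
                rw [hlex]
                cases stack with
                | nil =>
                  simp only [List.foldl, amcStepA]
                  rcases hc with hc | hc <;> subst hc <;>
                    simp [amcBalance, (ih rest hr).1]
                | cons top s =>
                  by_cases ht : c = top
                  · subst ht
                    simp only [List.foldl, amcStepA]
                    rcases hc with hc | hc <;> subst hc <;>
                      simp [amcBalance, (ih rest hr).1]
                  · simp only [List.foldl, amcStepA]
                    rcases hc with hc | hc <;> subst hc <;>
                      simp [amcBalance, ht, (ih rest hr).1]
              · obtain ⟨h1, h2⟩ := not_or.mp hc
                have hlex : amcLex (c :: rest) = amcLex rest := by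
                  rw [amcLex]; simp [hq, ho, hb, h1, h2]
                simp only [List.foldl, amcStepA]
                simp [hq, ho, hb, h1, h2, hlex, (ih rest hr).1]
      · intro stack
        by_cases he : c = '\\'
        · subst he
          simp only [List.foldl, amcStepA]
          simp only [if_pos trivial]
          rw [amcLexStr]
          simp only [reduceIte]
          cases rest with
          | nil => simp [amcLexStr, amcBalance]
          | cons c' rest' =>
            -- escaped state: the next char is consumed unconditionally
            have hr' : rest'.length ≤ n := by simp at hr; omega
            simp only [List.foldl, amcStepA, List.tail]
            exact (ih rest' hr').2 stack
        · by_cases hq : c = '"'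
          · subst hq
            simp only [List.foldl, amcStepA]
            rw [amcLexStr]
            simp [(ih rest hr).1]
          · simp only [List.foldl, amcStepA]
            rw [amcLexStr]
            simp [he, hq, (ih rest hr).2]

-- ===== VERDICT (by name: the statement is the Claim_ definition above) =====
theorem append_missing_closers_spec : Claim_equal_append_missing_closers := by
  intro raw _
  unfold Spec_append_missing_closers append_missing_closers append_missing_closers_alt
  simp only [(amc_fold_eq raw.toList.length raw.toList (le_refl _)).1 []]
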